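-- pv_equiv track=rewrite | github.com/wagnerlopesbr/python-studies-trybe | debug/debug_code01.py | inverse_factorial
-- ===== SOURCE A (Python) =====
-- def inverse_factorial(number: int):
--     num = 1
--     target_factorial = 1
--     while num < number:
--         target_factorial += 1
--         num *= target_factorial
--     if num == number:
--         return target_factorial
--     return None
-- ===== SOURCE B (Python) =====
-- def inverse_factorial(number: int):
--     if number < 1:
--         return None
--     n = number
--     k = 1
--     while n % (k + 1) == 0 and n > 1:
--         k += 1
--         n //= k
--     return k if n == 1 else None
-- ===== Notes on version B (the rewrite author's own statement) =====
-- stated objective: alternative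
-- what changed: B factors the input downward (repeatedly test divisibility by an incrementing counter and divide the running quotient) instead of A's building the factorial upward and comparing at the end.
import Mathlib
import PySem

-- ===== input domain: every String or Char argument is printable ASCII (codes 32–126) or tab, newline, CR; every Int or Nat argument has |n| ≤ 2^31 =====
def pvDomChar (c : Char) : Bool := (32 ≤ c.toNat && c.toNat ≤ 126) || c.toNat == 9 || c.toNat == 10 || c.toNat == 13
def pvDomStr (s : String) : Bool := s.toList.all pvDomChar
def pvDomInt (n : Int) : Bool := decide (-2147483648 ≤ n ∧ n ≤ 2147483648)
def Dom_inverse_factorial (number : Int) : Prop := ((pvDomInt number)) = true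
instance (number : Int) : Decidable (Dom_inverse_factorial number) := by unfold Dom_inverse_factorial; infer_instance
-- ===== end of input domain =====

-- B factors the input downward (running quotient + divisor counter) instead of A's
-- building the factorial upward and comparing at the end; alternative algorithm, same values.

-- ===== PORT A =====
-- the while loop of A; num and tf carry the invariant-free state, the two proof
-- arguments (always trivially true in Python, where num ≥ 1 and target_factorial ≥ 1)
-- only justify termination
def loopA (number num tf : Int) (hnum : 1 ≤ num) (htf : 1 ≤ tf) : Int × Int :=
  if h : num < number then
    loopA number (num * (tf + 1)) (tf + 1) (by nlinarith) (by omega)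
  else (num, tf)
termination_by (number - num).toNat
decreasing_by
  have h1 : num + 1 ≤ num * (tf + 1) := by nlinarith
  omega

def inverse_factorial (number : Int) : Option Int :=
  let p := loopA number 1 1 le_rfl le_rfl
  if p.1 = number then some p.2 else none

-- ===== PORT B =====
-- facts used by loopB's termination / positivity obligations
theorem loopB_aux (n k : Int) (hn : 0 < n) (hk : 1 ≤ k)
    (h : PySem.Int.mod n (k + 1) = 0 ∧ 1 < n) :
    0 < PySem.Int.floordiv n (k + 1) ∧ (PySem.Int.floordiv n (k + 1)).toNat < n.toNat := by
  have hd : (0:Int) < k + 1 := by omega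
  obtain ⟨c, hc⟩ := (PySem.Int.mod_eq_zero_iff_dvd n (k+1)).mp h.1
  have hc' : 0 < c := by nlinarith
  rw [PySem.Int.floordiv_eq_ediv_of_pos hd, hc, Int.mul_ediv_cancel_left c (by omega)]
  have h2 : 2 * c ≤ n := by nlinarith
  omega

-- the while loop of B
def loopB (n k : Int) (hn : 0 < n) (hk : 1 ≤ k) : Option Int :=
  if h : PySem.Int.mod n (k + 1) = 0 ∧ 1 < n then
    loopB (PySem.Int.floordiv n (k + 1)) (k + 1) (loopB_aux n k hn hk h).1 (by omega)
  else if n = 1 then some k else none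
termination_by n.toNat
decreasing_by exact (loopB_aux n k hn hk h).2

def inverse_factorial_alt (number : Int) : Option Int :=
  if hlt : number < 1 then none
  else loopB number 1 (by omega) le_rfl

-- ===== PRECONDITION & SPEC =====
def Spec_inverse_factorial (number : Int) (out : Option Int) : Prop := out = inverse_factorial_alt number
instance (number : Int) (out : Option Int) : Decidable (Spec_inverse_factorial number out) := by unfold Spec_inverse_factorial; infer_instance

-- ===== CLAIM (what is proved, stated in full; the proofs are below) =====
def Claim_equal_inverse_factorial : Prop := ∀ (number : Int), Dom_inverse_factorial number → Spec_inverse_factorial number (inverse_factorial number)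

-- ===== LEMMAS AND PROOFS =====

def factI (k : Int) : Int := (Nat.factorial k.toNat : Int)

theorem factI_pos (k : Int) : 0 < factI k := by
  unfold factI; exact_mod_cast Nat.factorial_pos _

theorem factI_one : factI 1 = 1 := rfl

theorem factI_succ (k : Int) (hk : 0 ≤ k) : factI (k + 1) = (k + 1) * factI k := by
  unfold factI
  have h1 : (k + 1).toNat = k.toNat + 1 := by omega
  rw [h1, Nat.factorial_succ]
  push_cast
  have : ((k.toNat : Int)) = k := by omega
  rw [this]

theorem factI_strictMono (j k : Int) (hj : 1 ≤ j) (hjk : j < k) : factI j < factI k := by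
  unfold factI
  have : j.toNat < k.toNat := by omega
  exact_mod_cast (Nat.factorial_lt (by omega)).mpr this

theorem factI_mono (j k : Int) (hjk : j ≤ k) : factI j ≤ factI k := by
  unfold factI
  exact_mod_cast Nat.factorial_le (by omega)

theorem factI_dvd (j k : Int) (hjk : j ≤ k) : factI j ∣ factI k := by
  unfold factI
  exact_mod_cast Nat.factorial_dvd_factorial (by omega)

theorem loopA_spec (number num tf : Int) (hnum : 1 ≤ num) (htf : 1 ≤ tf) :
    num = factI tf → (∀ j, 1 ≤ j → j < tf → factI j < number) →
    ((loopA number num tf hnum htf).1 = factI (loopA number num tf hnum htf).2 ∧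
     1 ≤ (loopA number num tf hnum htf).2 ∧
     ¬ (loopA number num tf hnum htf).1 < number ∧
     ∀ j, 1 ≤ j → j < (loopA number num tf hnum htf).2 → factI j < number) := by
  fun_induction loopA with
  | case1 num tf hnum htf h ih =>
    intro hinv hmin
    apply ih
    · rw [factI_succ tf (by omega), ← hinv]; ring
    · intro j hj hjtf
      rcases lt_or_eq_of_le (by omega : j ≤ tf) with h' | h'
      · exact hmin j hj h'
      · subst h'; rw [← hinv]; exact h
  | case2 num tf hnum htf h =>
    intro hinv hmin
    exact ⟨hinv, htf, h, hmin⟩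

theorem loopB_irrel (n n' k : Int) (hn : 0 < n) (hk : 1 ≤ k) (hnn : n = n') (hn' : 0 < n') :
    loopB n k hn hk = loopB n' k hn' hk := by subst hnn; rfl

theorem loopB_sound (n k : Int) (hn : 0 < n) (hk : 1 ≤ k) :
    ∀ r, loopB n k hn hk = some r → n * factI k = factI r ∧ k ≤ r := by
  fun_induction loopB with
  | case1 n k hn hk h ih =>
    intro r hr
    obtain ⟨h1, h2⟩ := ih r hr
    obtain ⟨c, hc⟩ := (PySem.Int.mod_eq_zero_iff_dvd n (k+1)).mp h.1
    have hdiv : PySem.Int.floordiv n (k + 1) = c := by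
      rw [PySem.Int.floordiv_eq_ediv_of_pos (by omega), hc,
        Int.mul_ediv_cancel_left c (by omega)]
    rw [hdiv] at h1
    constructor
    · rw [factI_succ k (by omega)] at h1
      calc n * factI k = c * ((k + 1) * factI k) := by rw [hc]; ring
        _ = factI r := h1
    · omega
  | case2 k hk hn h =>
    intro r hr
    cases hr
    exact ⟨one_mul _, le_rfl⟩
  | case3 n k hn hk h hne =>
    intro r hr
    cases hr

theorem loopB_complete : ∀ (m : Nat) (n k r : Int) (hn : 0 < n) (hk : 1 ≤ k),
    (r - k).toNat = m → k ≤ r → n * factI k = factI r → loopB n k hn hk = some r := by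
  intro m
  induction m using Nat.strong_induction_on with
  | _ m ih =>
    intro n k r hn hk hm hkr heq
    rcases eq_or_lt_of_le hkr with heq' | hlt
    · subst heq'
      have hfk := factI_pos k
      have hn1 : n = 1 := by nlinarith
      have hng : ¬(PySem.Int.mod n (k + 1) = 0 ∧ 1 < n) := by rintro ⟨-, h2⟩; omega
      rw [loopB, dif_neg hng, if_pos hn1]
    · have hfk := factI_pos k
      have hlt' : factI k < factI r := factI_strictMono k r hk hlt
      have hn1 : 1 < n := by nlinarith
      obtain ⟨c, hc⟩ := factI_dvd (k + 1) r (by omega)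
      have hstep : factI (k + 1) = (k + 1) * factI k := factI_succ k (by omega)
      have hn' : n = (k + 1) * c := by
        have h1 : n * factI k = ((k + 1) * c) * factI k := by
          rw [heq, hc, hstep]; ring
        exact mul_right_cancel₀ (by omega) h1
      have hmod : PySem.Int.mod n (k + 1) = 0 :=
        (PySem.Int.mod_eq_zero_iff_dvd n (k+1)).mpr ⟨c, hn'⟩
      rw [loopB, dif_pos ⟨hmod, hn1⟩]
      have hc0 : 0 < c := by nlinarith
      have hdiv : PySem.Int.floordiv n (k + 1) = c := by
        rw [PySem.Int.floordiv_eq_ediv_of_pos (by omega), hn',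
          Int.mul_ediv_cancel_left c (by omega)]
      rw [loopB_irrel _ c (k + 1) _ (by omega) hdiv hc0]
      apply ih (r - (k + 1)).toNat (by omega) c (k + 1) r hc0 (by omega) rfl (by omega)
      rw [hstep]
      calc c * ((k + 1) * factI k) = n * factI k := by rw [hn']; ring
        _ = factI r := heq

-- ===== VERDICT (by name: the statement is the Claim_ definition above) =====
theorem inverse_factorial_spec : Claim_equal_inverse_factorial := by
  intro number _
  unfold Spec_inverse_factorial inverse_factorial inverse_factorial_alt
  have H := loopA_spec number 1 1 le_rfl le_rfl factI_one.symm (by intro j hj hjlt; omega)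
  obtain ⟨H1, H2, H3, H4⟩ := H
  by_cases hlt : number < 1
  · rw [dif_pos hlt]
    have := factI_pos (loopA number 1 1 le_rfl le_rfl).2
    rw [if_neg (by omega)]
  · rw [dif_neg hlt]
    by_cases hp : (loopA number 1 1 le_rfl le_rfl).1 = number
    · rw [if_pos hp]
      symm
      apply loopB_complete ((loopA number 1 1 le_rfl le_rfl).2 - 1).toNat number 1 _ (by omega) le_rfl rfl H2
      rw [factI_one, mul_one, ← H1, hp]
    · rw [if_neg hp]
      cases hB : loopB number 1 (by omega) le_rfl with
      | none => rfl
      | some r =>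
        exfalso
        obtain ⟨hB1, hB2⟩ := loopB_sound number 1 (by omega) le_rfl r hB
        rw [factI_one, mul_one] at hB1
        by_cases hr : r < (loopA number 1 1 le_rfl le_rfl).2
        · have := H4 r hB2 hr
          omega
        · have := factI_mono (loopA number 1 1 le_rfl le_rfl).2 r (by omega)
          omega
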